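-- pv_equiv track=rewrite | github.com/amithkm9/AeroHack | backend/solvers/optimal_solver.py | get_white_edge_insertion
-- ===== SOURCE A (Python) =====
-- from typing import Dict, List, Tuple, Optional, Set
--
-- def get_white_edge_insertion(edge_pos: Tuple, other_color: str) -> List[str]:
--     """Get moves to insert white edge"""
--     pos1, pos2 = edge_pos
--     face1, idx1 = pos1
--     face2, idx2 = pos2
--
--     # Determine target face based on other color
--     target_map = {'G': 'F', 'R': 'R', 'B': 'B', 'O': 'L'}
--     target_face = target_map[other_color]
--
--     # If in top layer, align and insert
--     if face1 == 'U' or face2 == 'U':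
--         align_moves = []
--         current_face = face1 if face1 != 'U' else face2
--
--         # Align edge above target
--         while current_face != target_face:
--             align_moves.append('U')
--             # Update current face
--             face_map = {'F': 'L', 'L': 'B', 'B': 'R', 'R': 'F'}
--             current_face = face_map[current_face]
--
--         # Insert
--         align_moves.extend([target_face, target_face])
--         return align_moves
--
--     # Extract to top first
--     if face1 in ['F', 'R', 'B', 'L']:
--         return [face1]
--     elif face2 in ['F', 'R', 'B', 'L']:
--         return [face2]
--
--     return []
-- ===== SOURCE B (Python) =====
-- def get_white_edge_insertion(edge_pos, other_color):
--     """Get moves to insert white edge (closed-form U-alignment instead of a loop)."""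
--     (face1, _), (face2, _) = edge_pos
--     order = ['F', 'L', 'B', 'R']  # the cycle a 'U' turn walks: F -> L -> B -> R -> F
--     target_face = {'G': 'F', 'R': 'R', 'B': 'B', 'O': 'L'}[other_color]
--     if 'U' in (face1, face2):
--         current_face = face1 if face1 != 'U' else face2
--         count = (order.index(target_face) - order.index(current_face)) % 4
--         return ['U'] * count + [target_face, target_face]
--     for f in (face1, face2):
--         if f in order:
--             return [f]
--     return []
-- ===== Notes on version B (the rewrite author's own statement) =====
-- stated objective: simpler
-- what changed: The alignment while-loop that steps current_face through a face dict until it hits the target is replaced by a closed-form modular distance on the cyclic face order ['F','L','B','R'] (count = (index(target)-index(current)) % 4, then ['U']*count), and the extract if/elif chain becomes a first-match scan over the two faces.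
import Mathlib
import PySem

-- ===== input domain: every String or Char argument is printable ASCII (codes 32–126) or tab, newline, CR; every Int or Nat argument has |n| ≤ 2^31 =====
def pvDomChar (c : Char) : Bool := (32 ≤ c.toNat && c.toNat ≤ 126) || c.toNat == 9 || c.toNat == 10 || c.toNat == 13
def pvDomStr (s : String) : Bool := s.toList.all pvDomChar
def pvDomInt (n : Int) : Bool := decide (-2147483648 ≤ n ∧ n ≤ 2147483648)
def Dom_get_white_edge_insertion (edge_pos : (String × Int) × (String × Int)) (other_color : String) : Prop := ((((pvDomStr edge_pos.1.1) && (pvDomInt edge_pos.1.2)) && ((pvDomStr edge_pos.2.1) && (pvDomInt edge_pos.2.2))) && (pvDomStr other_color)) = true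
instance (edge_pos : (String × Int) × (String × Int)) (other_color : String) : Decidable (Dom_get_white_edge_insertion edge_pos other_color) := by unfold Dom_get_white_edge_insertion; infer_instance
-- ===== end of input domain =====

-- B replaces A's alignment while-loop by a closed-form modular distance on the
-- cyclic face order (simpler); the extract if/elif chain becomes a first-match scan.

-- ===== PORT A =====
def pvTargetMap : PySem.Dict String String :=
  PySem.Dict.ofList [("G", "F"), ("R", "R"), ("B", "B"), ("O", "L")]

def pvFaceMap : PySem.Dict String String :=
  PySem.Dict.ofList [("F", "L"), ("L", "B"), ("B", "R"), ("R", "F")]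

-- the 'while current_face != target_face' loop; fuel 4 suffices on every input
-- admitted by Pre_ (≤ 3 iterations); outside Pre_ the Python raises KeyError.
def pvAlign (target : String) : Nat → String → List String → List String
  | 0, _, acc => acc
  | n + 1, cf, acc =>
    if cf ≠ target then
      pvAlign target n ((pvFaceMap.get? cf).getD "") (acc ++ ["U"])
    else acc

def get_white_edge_insertion (edge_pos : (String × Int) × (String × Int)) (other_color : String) : List String :=
  let face1 := edge_pos.1.1
  let face2 := edge_pos.2.1
  -- target_map[other_color]; KeyError (excluded by Pre_) ported as getD ""
  let target_face := (pvTargetMap.get? other_color).getD ""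
  if face1 = "U" ∨ face2 = "U" then
    let current_face := if face1 ≠ "U" then face1 else face2
    pvAlign target_face 4 current_face [] ++ [target_face, target_face]
  else if face1 ∈ ["F", "R", "B", "L"] then [face1]
  else if face2 ∈ ["F", "R", "B", "L"] then [face2]
  else []

-- ===== PORT B =====
def pvOrder : List String := ["F", "L", "B", "R"]

-- 'for f in (face1, face2): if f in order: return [f]' / 'return []'
def pvFindExtract : List String → List String
  | [] => []
  | f :: rest => if f ∈ pvOrder then [f] else pvFindExtract rest

def get_white_edge_insertion_alt (edge_pos : (String × Int) × (String × Int)) (other_color : String) : List String :=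
  let face1 := edge_pos.1.1
  let face2 := edge_pos.2.1
  let target_face := ((PySem.Dict.ofList [("G", "F"), ("R", "R"), ("B", "B"), ("O", "L")]).get? other_color).getD ""
  if face1 = "U" ∨ face2 = "U" then
    let current_face := if face1 ≠ "U" then face1 else face2
    -- order.index(...); ValueError (excluded by Pre_) ported as getD 0
    let it : Int := ((PySem.List.index? pvOrder target_face).getD 0 : Nat)
    let ic : Int := ((PySem.List.index? pvOrder current_face).getD 0 : Nat)
    let count := PySem.Int.mod (it - ic) 4
    List.replicate count.toNat "U" ++ [target_face, target_face]
  else pvFindExtract [face1, face2]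

-- ===== PRECONDITION & SPEC =====
-- Pre_ excludes exactly the inputs where Python A raises KeyError: an
-- other_color outside the target_map, and top-layer edges whose non-U face is
-- not one of the four side faces (the while loop would hit face_map KeyError).
def Pre_get_white_edge_insertion (edge_pos : (String × Int) × (String × Int)) (other_color : String) : Prop :=
  other_color ∈ ["G", "R", "B", "O"] ∧
  ((edge_pos.1.1 = "U" ∨ edge_pos.2.1 = "U") →
    (if edge_pos.1.1 ≠ "U" then edge_pos.1.1 else edge_pos.2.1) ∈ ["F", "L", "B", "R"])
instance (edge_pos : (String × Int) × (String × Int)) (other_color : String) : Decidable (Pre_get_white_edge_insertion edge_pos other_color) := by unfold Pre_get_white_edge_insertion; infer_instance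

def pvWitness_get_white_edge_insertion : ((String × Int) × (String × Int)) × String := ((("U", 0), ("F", 1)), "G")

def Spec_get_white_edge_insertion (edge_pos : (String × Int) × (String × Int)) (other_color : String) (out : List String) : Prop := out = get_white_edge_insertion_alt edge_pos other_color
instance (edge_pos : (String × Int) × (String × Int)) (other_color : String) (out : List String) : Decidable (Spec_get_white_edge_insertion edge_pos other_color out) := by unfold Spec_get_white_edge_insertion; infer_instance

-- ===== CLAIM (what is proved, stated in full; the proofs are below) =====
def Claim_equal_get_white_edge_insertion : Prop := ∀ (edge_pos : (String × Int) × (String × Int)) (other_color : String), Dom_get_white_edge_insertion edge_pos other_color → Pre_get_white_edge_insertion edge_pos other_color → Spec_get_white_edge_insertion edge_pos other_color (get_white_edge_insertion edge_pos other_color)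

-- ===== LEMMAS AND PROOFS =====
-- both ports ignore the Int components of edge_pos (only the faces are read)
theorem pvA_drop_ints (f1 : String) (i1 : Int) (f2 : String) (i2 : Int) (oc : String) :
    get_white_edge_insertion ((f1, i1), (f2, i2)) oc = get_white_edge_insertion ((f1, 0), (f2, 0)) oc := rfl

theorem pvB_drop_ints (f1 : String) (i1 : Int) (f2 : String) (i2 : Int) (oc : String) :
    get_white_edge_insertion_alt ((f1, i1), (f2, i2)) oc = get_white_edge_insertion_alt ((f1, 0), (f2, 0)) oc := rfl

-- literal-dict evaluation facts used to step A's loop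
theorem pv_tG : (pvTargetMap.get? "G").getD "" = "F" := by rfl
theorem pv_tR : (pvTargetMap.get? "R").getD "" = "R" := by rfl
theorem pv_tB : (pvTargetMap.get? "B").getD "" = "B" := by rfl
theorem pv_tO : (pvTargetMap.get? "O").getD "" = "L" := by rfl
theorem pv_fF : (pvFaceMap.get? "F").getD "" = "L" := by rfl
theorem pv_fL : (pvFaceMap.get? "L").getD "" = "B" := by rfl
theorem pv_fB : (pvFaceMap.get? "B").getD "" = "R" := by rfl
theorem pv_fR : (pvFaceMap.get? "R").getD "" = "F" := by rfl

-- ===== VERDICT (by name: the statement is the Claim_ definition above) =====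
theorem get_white_edge_insertion_spec : Claim_equal_get_white_edge_insertion := by
  intro ep oc hdom hpre
  clear hdom
  obtain ⟨⟨f1, i1⟩, f2, i2⟩ := ep
  obtain ⟨hc, htop⟩ := hpre
  unfold Spec_get_white_edge_insertion
  rw [pvA_drop_ints, pvB_drop_ints]
  simp only [List.mem_cons, List.not_mem_nil, or_false] at hc
  by_cases h1 : f1 = "U"
  · subst h1
    have hm := htop (Or.inl rfl)
    simp at hm
    rcases hm with rfl | rfl | rfl | rfl <;> rcases hc with rfl | rfl | rfl | rfl <;>
      · simp [get_white_edge_insertion, get_white_edge_insertion_alt, pvAlign, pvOrder,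
          pv_tG, pv_tR, pv_tB, pv_tO, pv_fF, pv_fL, pv_fB, pv_fR,
          PySem.List.index?_eq_idxOf?, List.idxOf?, List.findIdx?_cons, PySem.Int.mod]
        try decide
  · by_cases h2 : f2 = "U"
    · subst h2
      have hm := htop (Or.inr rfl)
      simp only [ne_eq, h1, not_false_iff, if_true, List.mem_cons, List.not_mem_nil,
        or_false] at hm
      rcases hm with rfl | rfl | rfl | rfl <;> rcases hc with rfl | rfl | rfl | rfl <;>
        · simp [get_white_edge_insertion, get_white_edge_insertion_alt, pvAlign, pvOrder,
            pv_tG, pv_tR, pv_tB, pv_tO, pv_fF, pv_fL, pv_fB, pv_fR,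
            PySem.List.index?_eq_idxOf?, List.idxOf?, List.findIdx?_cons, PySem.Int.mod]
          try decide
    · have hcond : ¬ (f1 = "U" ∨ f2 = "U") := by tauto
      clear htop hc
      simp only [get_white_edge_insertion, get_white_edge_insertion_alt]
      rw [if_neg hcond, if_neg hcond]
      simp only [pvFindExtract, pvOrder, List.mem_cons, List.not_mem_nil, or_false]
      split_ifs <;> tauto
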